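-- pv_equiv track=rewrite | github.com/rosenbergdm/signout | src/signout/helpers.py | gen_med_sorter
-- ===== SOURCE A (Python) =====
-- def gen_med_sorter(intern_list):
--     gen_med = []
--     non_gen_med = []
--     for i in intern_list:
--         if i["name"][0:7] == "Gen Med":
--             gen_med.append(i)
--         else:
--             non_gen_med.append(i)
--     gen_med.extend(non_gen_med)
--     return gen_med
-- ===== SOURCE B (Python) =====
-- def gen_med_sorter(intern_list):
--     return sorted(intern_list, key=lambda i: i["name"][0:7] != "Gen Med")
-- ===== Notes on version B (the rewrite author's own statement) =====
-- stated objective: idiomatic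
-- what changed: Replaces the explicit two-accumulator partition loop with a single stable sort on the boolean key i['name'][0:7] != 'Gen Med', which puts Gen Med entries first and preserves relative order within each group.
import Mathlib
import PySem

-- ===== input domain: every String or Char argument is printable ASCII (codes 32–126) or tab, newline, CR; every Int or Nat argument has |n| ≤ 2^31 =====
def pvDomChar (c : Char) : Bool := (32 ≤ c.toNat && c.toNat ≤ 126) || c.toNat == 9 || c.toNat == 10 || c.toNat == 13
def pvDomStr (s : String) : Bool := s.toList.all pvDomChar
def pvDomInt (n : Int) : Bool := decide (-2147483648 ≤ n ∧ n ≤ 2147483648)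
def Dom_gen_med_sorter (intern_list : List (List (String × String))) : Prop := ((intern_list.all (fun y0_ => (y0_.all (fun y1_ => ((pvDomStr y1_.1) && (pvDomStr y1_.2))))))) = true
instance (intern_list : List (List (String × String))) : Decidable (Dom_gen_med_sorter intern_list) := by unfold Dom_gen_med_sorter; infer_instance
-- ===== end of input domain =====

-- B replaces A's two-accumulator partition loop with one stable sort on a boolean key (idiomatic rewrite, same result).


-- ===== PORT A =====
-- i["name"] is ported as Dict.getD with default ""; the default is only reachable
-- when the key "name" is absent, where Python raises KeyError (excluded by Pre_).
def gen_med_sorter (intern_list : List (List (String × String))) : List (List (String × String)) :=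
  let r := intern_list.foldl
    (fun (acc : List (List (String × String)) × List (List (String × String))) i =>
      if PySem.Str.slice (PySem.Dict.getD ⟨i⟩ "name" "") (some 0) (some 7) == "Gen Med"
      then (acc.1 ++ [i], acc.2)
      else (acc.1, acc.2 ++ [i]))
    ([], [])
  r.1 ++ r.2

-- ===== PORT B =====
-- sorted(intern_list, key=lambda i: i["name"][0:7] != "Gen Med")  (same KeyError caveat as A's port)
def gen_med_sorter_alt (intern_list : List (List (String × String))) : List (List (String × String)) :=
  PySem.List.sorted intern_list
    (fun i => PySem.Str.slice (PySem.Dict.getD ⟨i⟩ "name" "") (some 0) (some 7) != "Gen Med") false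

-- ===== PRECONDITION & SPEC =====
-- Pre_ excludes exactly the inputs where some entry lacks the key "name": both Pythons raise KeyError there.
def Pre_gen_med_sorter (intern_list : List (List (String × String))) : Prop :=
  (intern_list.all (fun i => i.any (fun kv => kv.1 == "name"))) = true
instance (intern_list : List (List (String × String))) : Decidable (Pre_gen_med_sorter intern_list) := by
  unfold Pre_gen_med_sorter; infer_instance

def pvWitness_gen_med_sorter : (List (List (String × String))) :=
  [[("name", "Gen Med 1")], [("name", "Cards")], [("name", "Gen Med 2")]]

def Spec_gen_med_sorter (intern_list : List (List (String × String))) (out : List (List (String × String))) : Prop := out = gen_med_sorter_alt intern_list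
instance (intern_list : List (List (String × String))) (out : List (List (String × String))) : Decidable (Spec_gen_med_sorter intern_list out) := by unfold Spec_gen_med_sorter; infer_instance

-- ===== CLAIM (what is proved, stated in full; the proofs are below) =====
def Claim_equal_gen_med_sorter : Prop := ∀ (intern_list : List (List (String × String))), Dom_gen_med_sorter intern_list → Pre_gen_med_sorter intern_list → Spec_gen_med_sorter intern_list (gen_med_sorter intern_list)

-- ===== LEMMAS AND PROOFS =====

-- inserting x into (falses ++ trues) by the boolean-key order
theorem insertBy_bool {α : Type} (key : α → Bool) (x : α) (F T : List α)
    (hF : ∀ y ∈ F, key y = false) (hT : ∀ y ∈ T, key y = true) :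
    PySem.List.insertBy (fun a b => decide (key a < key b)) x (F ++ T) =
      if key x then F ++ T ++ [x] else F ++ x :: T := by
  induction F with
  | nil =>
    simp only [List.nil_append]
    induction T with
    | nil => cases h : key x <;> simp [PySem.List.insertBy]
    | cons t ts ih =>
      have ht : key t = true := hT t (by simp)
      cases h : key x with
      | false => simp [PySem.List.insertBy, h, ht]
      | true =>
        simp only [PySem.List.insertBy, h, ht]
        have := ih (fun y hy => hT y (by simp [hy]))
        simp [h] at this
        simp [this]
  | cons f fs ih =>
    have hf : key f = false := hF f (by simp)
    have := ih (fun y hy => hF y (by simp [hy]))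
    cases h : key x with
    | false =>
      simp [h] at this
      simp [PySem.List.insertBy, hf, h, this]
    | true =>
      simp [h] at this
      simp [PySem.List.insertBy, hf, h, this]

-- stable sort by a boolean key is the partition: false-keyed first, true-keyed after, each in order
theorem sorted_bool_key {α : Type} (key : α → Bool) (xs : List α) :
    PySem.List.sorted xs key false =
      xs.filter (fun x => !key x) ++ xs.filter key := by
  rw [PySem.List.sorted_eq_foldl_insertBy]
  induction xs using List.reverseRecOn with
  | nil => simp
  | append_singleton ys x ih =>
    rw [List.foldl_append, List.foldl_cons, List.foldl_nil, ih,
        insertBy_bool key x _ _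
          (by intro y hy; simp only [List.mem_filter] at hy; simpa using hy.2)
          (by intro y hy; simp only [List.mem_filter] at hy; exact hy.2)]
    cases h : key x <;> simp [List.filter_append, h]

-- A's fold computes the two filters, each appended to its accumulator
theorem foldA_eq {α : Type} (P : α → Bool) (xs : List α) (g n : List α) :
    xs.foldl (fun (acc : List α × List α) i =>
        if P i then (acc.1 ++ [i], acc.2) else (acc.1, acc.2 ++ [i])) (g, n) =
      (g ++ xs.filter P, n ++ xs.filter (fun i => !P i)) := by
  induction xs generalizing g n with
  | nil => simp
  | cons x xs ih =>
    cases h : P x <;> simp [h, ih, List.append_assoc]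

theorem gen_med_sorter_eq (intern_list : List (List (String × String))) :
    gen_med_sorter intern_list = gen_med_sorter_alt intern_list := by
  unfold gen_med_sorter gen_med_sorter_alt
  rw [sorted_bool_key, foldA_eq]
  simp only [List.nil_append]
  congr 1 <;> apply List.filter_congr <;> intro i _ <;>
    cases h : (PySem.Str.slice (PySem.Dict.getD ⟨i⟩ "name" "") (some 0) (some 7) == "Gen Med") <;>
    simp_all [bne]

-- ===== VERDICT (by name: the statement is the Claim_ definition above) =====
theorem gen_med_sorter_spec : Claim_equal_gen_med_sorter := by
  intro l _ _
  unfold Spec_gen_med_sorter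
  exact gen_med_sorter_eq l
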